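-- pv_equiv track=rewrite | github.com/Cristina-Wall/CT421_Assignment1 | main.py | best_crossover_point
-- ===== SOURCE A (Python) =====
-- def count_fitness_string(input_string):
--     curr_fitness = 0
--
--     for x in input_string:
--         if x == "1":
--             curr_fitness += 1
--     return curr_fitness
--
-- def single_point_crossover(parent_string1, parent_string2, point):
--     string1 = list(parent_string1)
--     string2 = list(parent_string2)
--
--     for y in range(point, len(parent_string1)):
--         string1[y], string2[y] = string2[y], string1[y]
--     new_string1 = ''.join(string1)
--     new_string2 = ''.join(string2)
--
--     return new_string1, new_string2
--
-- def best_crossover_point(string1, string2):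
--     best_fitness = 0
--     temp1 = ""
--     temp2 = ""
--     best_cross_point = 0
--
--     for z in range(30):
--         temp1, temp2 = single_point_crossover(string1, string2, z)
--         fit1 = count_fitness_string(temp1)
--         fit2 = count_fitness_string(temp2)
--         if fit1 > fit2:
--             if fit1 > best_fitness:
--                 best_fitness = fit1
--                 best_cross_point = z
--         elif fit2 > fit1:
--             if fit2 > best_fitness:
--                 best_fitness = fit2
--                 best_cross_point = z
--
--     return best_cross_point
-- ===== SOURCE B (Python) =====
-- def best_crossover_point(string1, string2):
--     n = len(string1)
--     total1 = string1.count('1')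
--     head2 = string2[:n].count('1')
--     total2 = string2.count('1')
--     a = 0  # ones in string1[:min(z, n)]
--     b = 0  # ones in string2[:min(z, n)]
--     best_fitness = 0
--     best_cross_point = 0
--     for z in range(30):
--         fit1 = a + head2 - b
--         fit2 = b + total1 - a + total2 - head2
--         if fit1 > fit2:
--             if fit1 > best_fitness:
--                 best_fitness = fit1
--                 best_cross_point = z
--         elif fit2 > fit1:
--             if fit2 > best_fitness:
--                 best_fitness = fit2
--                 best_cross_point = z
--         if z < n:
--             a += string1[z] == '1'
--             if z < len(string2):
--                 b += string2[z] == '1'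
--     return best_cross_point
-- ===== Notes on version B (the rewrite author's own statement) =====
-- stated objective: faster
-- what changed: B replaces A's 30 rebuild-and-rescan crossovers (each materialising both child strings and counting their ones) with three one-pass counts of '1' plus running prefix counts, so each candidate point's two fitnesses are computed in O(1) arithmetic.
import Mathlib
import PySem

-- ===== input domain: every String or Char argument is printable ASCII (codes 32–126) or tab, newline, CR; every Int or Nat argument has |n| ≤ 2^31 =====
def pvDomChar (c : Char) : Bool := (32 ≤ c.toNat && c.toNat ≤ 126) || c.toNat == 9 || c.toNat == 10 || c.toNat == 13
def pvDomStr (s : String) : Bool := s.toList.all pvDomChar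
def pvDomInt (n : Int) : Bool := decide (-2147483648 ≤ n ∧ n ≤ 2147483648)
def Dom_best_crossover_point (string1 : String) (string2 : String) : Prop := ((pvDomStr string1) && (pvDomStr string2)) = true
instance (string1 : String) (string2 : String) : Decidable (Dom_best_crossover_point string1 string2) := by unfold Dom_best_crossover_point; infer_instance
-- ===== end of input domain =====

-- B computes each candidate point's two fitnesses in O(1) from running prefix counts of '1'
-- instead of rebuilding and rescanning both child strings for each of the 30 points.

-- ===== PORT A =====
def count_fitness_string (input_string : String) : Int :=
  input_string.toList.foldl (fun curr_fitness x => if x == '1' then curr_fitness + 1 else curr_fitness) 0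

-- the in-place swap loop `for y in range(point, len(parent_string1))`; none = IndexError on string2[y]
def spcLoop : List Nat → List Char → List Char → Option (List Char × List Char)
  | [], a, b => some (a, b)
  | y :: ys, a, b =>
    match a[y]?, b[y]? with
    | some av, some bv => spcLoop ys (a.set y bv) (b.set y av)
    | _, _ => none

def single_point_crossover (parent_string1 parent_string2 : String) (point : Nat) : Option (String × String) :=
  match spcLoop (List.range' point (parent_string1.toList.length - point)) parent_string1.toList parent_string2.toList with
  | some (l1, l2) => some (String.ofList l1, String.ofList l2)
  | none => none

-- one iteration of A's `for z in range(30)` loop (state: best_fitness, temp1, temp2, best_cross_point)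
def stepA (string1 string2 : String) (st : Option (Int × String × String × Int)) (z : Nat) :
    Option (Int × String × String × Int) :=
  match st with
  | none => none
  | some (best_fitness, _, _, best_cross_point) =>
    match single_point_crossover string1 string2 z with
    | none => none
    | some (temp1, temp2) =>
      let fit1 := count_fitness_string temp1
      let fit2 := count_fitness_string temp2
      if fit1 > fit2 then
        if fit1 > best_fitness then some (fit1, temp1, temp2, (z : Int))
        else some (best_fitness, temp1, temp2, best_cross_point)
      else if fit2 > fit1 then
        if fit2 > best_fitness then some (fit2, temp1, temp2, (z : Int))
        else some (best_fitness, temp1, temp2, best_cross_point)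
      else some (best_fitness, temp1, temp2, best_cross_point)

def best_crossover_point (string1 : String) (string2 : String) : Int :=
  match (List.range' 0 30).foldl (stepA string1 string2) (some (0, "", "", 0)) with
  | some (_, _, _, best_cross_point) => best_cross_point
  | none => 0

-- ===== PORT B =====
-- one iteration of B's loop (state: a, b, best_fitness, best_cross_point)
def stepB (l1 l2 : List Char) (total1 head2 total2 : Int) (st : Int × Int × Int × Int) (z : Nat) :
    Int × Int × Int × Int :=
  match st with
  | (a, b, best_fitness, best_cross_point) =>
    let fit1 := a + head2 - b
    let fit2 := b + total1 - a + total2 - head2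
    let bb : Int × Int :=
      if fit1 > fit2 then
        if fit1 > best_fitness then (fit1, (z : Int)) else (best_fitness, best_cross_point)
      else if fit2 > fit1 then
        if fit2 > best_fitness then (fit2, (z : Int)) else (best_fitness, best_cross_point)
      else (best_fitness, best_cross_point)
    let a' := if z < l1.length then a + (if l1.getD z ' ' = '1' then 1 else 0) else a
    let b' := if z < l1.length ∧ z < l2.length then b + (if l2.getD z ' ' = '1' then 1 else 0) else b
    (a', b', bb.1, bb.2)

-- str.count('1') of a single character = List.count '1'; string2[:n] = take n
def best_crossover_point_alt (string1 : String) (string2 : String) : Int :=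
  let l1 := string1.toList
  let l2 := string2.toList
  let total1 : Int := l1.count '1'
  let head2 : Int := (l2.take l1.length).count '1'
  let total2 : Int := l2.count '1'
  ((List.range' 0 30).foldl (stepB l1 l2 total1 head2 total2) (0, 0, 0, 0)).2.2.2

-- ===== PRECONDITION & SPEC =====
-- Pre_ excludes exactly the inputs where A raises IndexError (string2 shorter than string1).
def Pre_best_crossover_point (string1 : String) (string2 : String) : Prop :=
  string1.toList.length ≤ string2.toList.length
instance (string1 : String) (string2 : String) : Decidable (Pre_best_crossover_point string1 string2) := by
  unfold Pre_best_crossover_point; infer_instance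

def pvWitness_best_crossover_point : String × String := ("0110", "10011")

def Spec_best_crossover_point (string1 : String) (string2 : String) (out : Int) : Prop :=
  out = best_crossover_point_alt string1 string2
instance (string1 : String) (string2 : String) (out : Int) : Decidable (Spec_best_crossover_point string1 string2 out) := by
  unfold Spec_best_crossover_point; infer_instance

-- ===== CLAIM (what is proved, stated in full; the proofs are below) =====
def Claim_equal_best_crossover_point : Prop := ∀ (string1 : String) (string2 : String), Dom_best_crossover_point string1 string2 → Pre_best_crossover_point string1 string2 → Spec_best_crossover_point string1 string2 (best_crossover_point string1 string2)

-- ===== LEMMAS AND PROOFS =====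

-- count of '1' in l[:min z n] as Int (B's running `a`/`b`)
def pref (l : List Char) (n z : Nat) : Int := ((l.take (min z n)).count '1' : Int)

lemma cfs_eq (l : List Char) : count_fitness_string (String.ofList l) = (l.count '1' : Int) := by
  simp only [count_fitness_string, String.toList_ofList]
  rw [PySem.List.foldl_beq_add_one]
  simp

lemma set_take_succ {l : List Char} {z : Nat} (h : z < l.length) (v : Char) :
    (l.set z v).take (z+1) = l.take z ++ [v] := by
  have hlen : (l.take z).length = z := by rw [List.length_take]; omega
  rw [List.take_set, List.take_add_one, List.getElem?_eq_getElem h, List.set_append]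
  simp [hlen]

lemma spcLoop_eq : ∀ (k z : Nat) (a b : List Char), z + k = a.length → a.length ≤ b.length →
    spcLoop (List.range' z k) a b =
      some (a.take z ++ (b.take a.length).drop z, b.take z ++ a.drop z ++ b.drop a.length) := by
  intro k
  induction k with
  | zero =>
    intro z a b hz hab
    have hz' : z = a.length := by omega
    subst hz'
    simp only [List.range'_zero, spcLoop]
    have e1 : (b.take a.length).drop a.length = [] :=
      List.drop_eq_nil_of_le (by rw [List.length_take]; omega)
    have e2 : a.drop a.length = [] := List.drop_eq_nil_of_le le_rfl
    rw [List.take_length, e1, e2, List.append_nil, List.append_nil, List.take_append_drop]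
  | succ k ih =>
    intro z a b hz hab
    have hza : z < a.length := by omega
    have hzb : z < b.length := by omega
    rw [List.range'_succ]
    simp only [spcLoop, List.getElem?_eq_getElem hza, List.getElem?_eq_getElem hzb]
    rw [ih (z+1) (a.set z b[z]) (b.set z a[z]) (by simp; omega) (by simp [hab])]
    simp only [List.length_set]
    have h1 : (a.set z b[z]).take (z+1) = a.take z ++ [b[z]] := set_take_succ hza _
    have h2 : ((b.set z a[z]).take a.length).drop (z+1) = (b.take a.length).drop (z+1) := by
      rw [List.take_set, List.drop_set, if_pos (by omega)]
    have h3 : (b.take a.length).drop z = b[z] :: (b.take a.length).drop (z+1) := by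
      rw [List.drop_eq_getElem_cons (by rw [List.length_take]; omega), List.getElem_take]
    have h4 : (b.set z a[z]).take (z+1) = b.take z ++ [a[z]] := set_take_succ hzb _
    have h5 : (a.set z b[z]).drop (z+1) = a.drop (z+1) := by
      rw [List.drop_set, if_pos (by omega)]
    have h6 : (b.set z a[z]).drop a.length = b.drop a.length := by
      rw [List.drop_set, if_pos hza]
    have h7 : a.drop z = a[z] :: a.drop (z+1) := List.drop_eq_getElem_cons hza
    rw [h1, h2, h3, h4, h5, h6, h7]
    simp [List.append_assoc]

lemma spc_lt (s1 s2 : String) (z : Nat) (hz : z < s1.toList.length)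
    (h : s1.toList.length ≤ s2.toList.length) :
    single_point_crossover s1 s2 z =
      some (String.ofList (s1.toList.take z ++ (s2.toList.take s1.toList.length).drop z),
            String.ofList (s2.toList.take z ++ s1.toList.drop z ++ s2.toList.drop s1.toList.length)) := by
  unfold single_point_crossover
  rw [spcLoop_eq (s1.toList.length - z) z s1.toList s2.toList (by omega) h]

lemma spc_ge (s1 s2 : String) (z : Nat) (hz : s1.toList.length ≤ z) :
    single_point_crossover s1 s2 z = some (String.ofList s1.toList, String.ofList s2.toList) := by
  unfold single_point_crossover
  have e : s1.toList.length - z = 0 := by omega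
  rw [e, List.range'_zero]
  simp [spcLoop]

lemma pref_succ (l : List Char) (n z : Nat) (hl : n ≤ l.length) :
    pref l n (z+1) = pref l n z + (if z < n then (if l.getD z ' ' = '1' then (1:Int) else 0) else 0) := by
  by_cases hzn : z < n
  · have hzl : z < l.length := by omega
    unfold pref
    rw [Nat.min_eq_left (by omega), Nat.min_eq_left (by omega), List.take_add_one,
      List.getElem?_eq_getElem hzl, if_pos hzn, List.getD_eq_getElem l ' ' hzl]
    simp only [Option.toList_some, List.count_append, List.count_singleton]
    by_cases hc : l[z] = '1' <;> simp [hc]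
  · have e : min (z+1) n = min z n := by omega
    simp [pref, e, hzn]

lemma fit1_eq (l1 l2 : List Char) (z : Nat) (hz : z ≤ l1.length) (_h : l1.length ≤ l2.length) :
    ((l1.take z ++ (l2.take l1.length).drop z).count '1' : Int) =
      pref l1 l1.length z + ((l2.take l1.length).count '1' : Int) - pref l2 l1.length z := by
  unfold pref
  rw [Nat.min_eq_left hz]
  have hsplit : List.count '1' (l2.take l1.length) =
      List.count '1' (l2.take z) + List.count '1' ((l2.take l1.length).drop z) := by
    conv_lhs => rw [← List.take_append_drop z (l2.take l1.length)]
    rw [List.count_append, List.take_take, Nat.min_eq_left hz]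
  rw [List.count_append]
  push_cast
  omega

lemma fit2_eq (l1 l2 : List Char) (z : Nat) (hz : z ≤ l1.length) (_h : l1.length ≤ l2.length) :
    ((l2.take z ++ l1.drop z ++ l2.drop l1.length).count '1' : Int) =
      pref l2 l1.length z + (l1.count '1' : Int) - pref l1 l1.length z
        + (l2.count '1' : Int) - ((l2.take l1.length).count '1' : Int) := by
  unfold pref
  rw [Nat.min_eq_left hz]
  have h1 : List.count '1' l1 = List.count '1' (l1.take z) + List.count '1' (l1.drop z) := by
    conv_lhs => rw [← List.take_append_drop z l1]
    rw [List.count_append]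
  have h2 : List.count '1' l2 =
      List.count '1' (l2.take l1.length) + List.count '1' (l2.drop l1.length) := by
    conv_lhs => rw [← List.take_append_drop l1.length l2]
    rw [List.count_append]
  rw [List.count_append, List.count_append]
  push_cast
  omega

lemma loop_eq (s1 s2 : String) (h : s1.toList.length ≤ s2.toList.length) :
    ∀ (k z : Nat) (bf bp : Int) (t1 t2 : String),
    ∃ u1 u2,
      (List.range' z k).foldl (stepA s1 s2) (some (bf, t1, t2, bp)) =
        some (((List.range' z k).foldl
                 (stepB s1.toList s2.toList (s1.toList.count '1')
                   ((s2.toList.take s1.toList.length).count '1') (s2.toList.count '1'))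
                 (pref s1.toList s1.toList.length z, pref s2.toList s1.toList.length z, bf, bp)).2.2.1,
              u1, u2,
              ((List.range' z k).foldl
                 (stepB s1.toList s2.toList (s1.toList.count '1')
                   ((s2.toList.take s1.toList.length).count '1') (s2.toList.count '1'))
                 (pref s1.toList s1.toList.length z, pref s2.toList s1.toList.length z, bf, bp)).2.2.2) := by
  intro k
  induction k with
  | zero =>
    intro z bf bp t1 t2
    simp only [List.range'_zero, List.foldl_nil]
    exact ⟨t1, t2, rfl⟩
  | succ k ih =>
    intro z bf bp t1 t2
    rw [List.range'_succ]
    simp only [List.foldl_cons]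
    by_cases hz : z < s1.toList.length
    · simp only [stepA, spc_lt s1 s2 z hz h, cfs_eq]
      rw [fit1_eq s1.toList s2.toList z hz.le h, fit2_eq s1.toList s2.toList z hz.le h]
      simp only [stepB]
      have g2 : z < s1.toList.length ∧ z < s2.toList.length := ⟨hz, by omega⟩
      rw [if_pos hz, if_pos g2]
      rw [show pref s1.toList s1.toList.length z + (if s1.toList.getD z ' ' = '1' then (1:Int) else 0)
            = pref s1.toList s1.toList.length (z+1) from by
          rw [pref_succ _ _ _ le_rfl, if_pos hz],
        show pref s2.toList s1.toList.length z + (if s2.toList.getD z ' ' = '1' then (1:Int) else 0)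
            = pref s2.toList s1.toList.length (z+1) from by
          rw [pref_succ _ _ _ h, if_pos hz]]
      split_ifs <;> exact ih (z+1) _ _ _ _
    · have hzn : s1.toList.length ≤ z := by omega
      simp only [stepA, spc_ge s1 s2 z hzn, cfs_eq]
      simp only [stepB]
      have e1 : pref s1.toList s1.toList.length z = (s1.toList.count '1' : Int) := by
        unfold pref; rw [Nat.min_eq_right hzn, List.take_length]
      have e2 : pref s2.toList s1.toList.length z
          = ((s2.toList.take s1.toList.length).count '1' : Int) := by
        unfold pref; rw [Nat.min_eq_right hzn]
      rw [show pref s1.toList s1.toList.length z + ((s2.toList.take s1.toList.length).count '1' : Int)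
            - pref s2.toList s1.toList.length z = (s1.toList.count '1' : Int) from by
          rw [e1, e2]; ring,
        show pref s2.toList s1.toList.length z + (s1.toList.count '1' : Int)
            - pref s1.toList s1.toList.length z + (s2.toList.count '1' : Int)
            - ((s2.toList.take s1.toList.length).count '1' : Int) = (s2.toList.count '1' : Int) from by
          rw [e1, e2]; ring]
      have gneg : ¬(z < s1.toList.length ∧ z < s2.toList.length) := fun hc => hz hc.1
      rw [if_neg hz, if_neg gneg]
      rw [show pref s1.toList s1.toList.length z = pref s1.toList s1.toList.length (z+1) from by
          rw [pref_succ _ _ _ le_rfl, if_neg hz, add_zero],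
        show pref s2.toList s1.toList.length z = pref s2.toList s1.toList.length (z+1) from by
          rw [pref_succ _ _ _ h, if_neg hz, add_zero]]
      split_ifs <;> exact ih (z+1) _ _ _ _

-- ===== VERDICT (by name: the statement is the Claim_ definition above) =====
theorem best_crossover_point_spec : Claim_equal_best_crossover_point := by
  intro s1 s2 _ hpre
  unfold Spec_best_crossover_point best_crossover_point best_crossover_point_alt
  obtain ⟨u1, u2, heq⟩ := loop_eq s1 s2 hpre 30 0 0 0 "" ""
  simp only [pref, Nat.min_eq_left (Nat.zero_le _), List.take_zero, List.count_nil,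
    Nat.cast_zero] at heq
  rw [heq]
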